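-- pv_equiv track=rewrite | github.com/DeinerAcosta/motor-ia-quirofano | prueba_ocr.py | buscar_match_inteligente
-- ===== SOURCE A (Python) =====
-- def buscar_match_inteligente(texto_ocr, codigos_reales):
--     texto_limpio = texto_ocr.replace(" ", "").replace("_", "").upper()
--     texto_sin_guion = texto_limpio.replace("-", "")
--
--     for codigo_bd in codigos_reales:
--         if codigo_bd.replace("-", "").upper() == texto_sin_guion: return codigo_bd
--
--     texto_corregido = texto_sin_guion.replace("O", "0").replace("I", "1").replace("S", "5")
--     for codigo_bd in codigos_reales:
--         if codigo_bd.replace("-", "").upper().replace("O", "0") == texto_corregido: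
--             return codigo_bd
--
--     if len(texto_corregido) >= 4:
--         for codigo_bd in codigos_reales:
--             if texto_corregido in codigo_bd.replace("-", "").upper().replace("O", "0"):
--                 return codigo_bd
--     return None
-- ===== SOURCE B (Python) =====
-- def buscar_match_inteligente(texto_ocr, codigos_reales):
--     texto_sin_guion = texto_ocr.replace(" ", "").replace("_", "").upper().replace("-", "")
--     texto_corregido = texto_sin_guion.replace("O", "0").replace("I", "1").replace("S", "5")
--     eq_match = None
--     sub_match = None
--     for codigo in codigos_reales:
--         norm = codigo.replace("-", "").upper()
--         if norm == texto_sin_guion: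
--             return codigo
--         corr = norm.replace("O", "0")
--         if eq_match is None and corr == texto_corregido:
--             eq_match = codigo
--         if sub_match is None and texto_corregido in corr:
--             sub_match = codigo
--     if eq_match is not None:
--         return eq_match
--     if len(texto_corregido) >= 4:
--         return sub_match
--     return None
-- ===== Notes on version B (the rewrite author's own statement) =====
-- stated objective: faster
-- what changed: Replaces A's three sequential scans (each re-normalizing every code) with one scan that normalizes each code once and remembers the first exact-corrected and first substring candidates.
import Mathlib
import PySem

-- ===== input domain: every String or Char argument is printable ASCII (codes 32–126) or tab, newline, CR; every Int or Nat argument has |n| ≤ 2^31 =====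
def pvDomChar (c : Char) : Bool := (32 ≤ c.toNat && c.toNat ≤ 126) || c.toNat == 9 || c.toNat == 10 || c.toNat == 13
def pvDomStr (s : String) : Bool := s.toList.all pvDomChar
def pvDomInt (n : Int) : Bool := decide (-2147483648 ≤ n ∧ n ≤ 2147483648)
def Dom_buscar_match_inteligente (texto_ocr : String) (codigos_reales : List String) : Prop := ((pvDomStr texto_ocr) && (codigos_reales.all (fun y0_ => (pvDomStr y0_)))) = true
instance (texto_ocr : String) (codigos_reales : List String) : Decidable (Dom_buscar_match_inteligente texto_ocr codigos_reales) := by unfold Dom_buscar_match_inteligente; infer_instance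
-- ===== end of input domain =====

-- B replaces A's three sequential scans with one pass that normalizes each code once
-- and remembers the phase-2 and phase-3 candidates (objective: faster, constant-factor).


-- ===== PORT A =====
-- first loop: return codigo_bd if codigo_bd.replace("-","").upper() == texto_sin_guion
def bmiLoop1 (tsg : String) : List String → Option String
  | [] => none
  | c :: rest =>
    if PySem.Str.upper (PySem.Str.replace c "-" "") == tsg then some c
    else bmiLoop1 tsg rest

-- second loop: return codigo_bd if ....replace("O","0") == texto_corregido
def bmiLoop2 (tc : String) : List String → Option String
  | [] => none
  | c :: rest =>
    if PySem.Str.replace (PySem.Str.upper (PySem.Str.replace c "-" "")) "O" "0" == tc then some c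
    else bmiLoop2 tc rest

-- third loop: return codigo_bd if texto_corregido in ....replace("O","0")
def bmiLoop3 (tc : String) : List String → Option String
  | [] => none
  | c :: rest =>
    if PySem.Str.isIn tc (PySem.Str.replace (PySem.Str.upper (PySem.Str.replace c "-" "")) "O" "0") then some c
    else bmiLoop3 tc rest

def buscar_match_inteligente (texto_ocr : String) (codigos_reales : List String) : Option String :=
  let texto_limpio := PySem.Str.upper (PySem.Str.replace (PySem.Str.replace texto_ocr " " "") "_" "")
  let texto_sin_guion := PySem.Str.replace texto_limpio "-" ""
  match bmiLoop1 texto_sin_guion codigos_reales with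
  | some c => some c
  | none =>
    let texto_corregido := PySem.Str.replace (PySem.Str.replace (PySem.Str.replace texto_sin_guion "O" "0") "I" "1") "S" "5"
    match bmiLoop2 texto_corregido codigos_reales with
    | some c => some c
    | none =>
      if PySem.Str.len texto_corregido ≥ 4 then bmiLoop3 texto_corregido codigos_reales
      else none

-- ===== PORT B =====
-- one pass: early return on a phase-1 hit (first component some), otherwise carry the
-- first phase-2 candidate (eqm) and the first phase-3 candidate (subm)
def bmiAltLoop (tsg tc : String) : List String → Option String → Option String →
    Option String × Option String × Option String
  | [], eqm, subm => (none, eqm, subm)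
  | c :: rest, eqm, subm =>
    let norm := PySem.Str.upper (PySem.Str.replace c "-" "")
    if norm == tsg then (some c, eqm, subm)
    else
      let corr := PySem.Str.replace norm "O" "0"
      let eqm' := if eqm.isNone && (corr == tc) then some c else eqm
      let subm' := if subm.isNone && PySem.Str.isIn tc corr then some c else subm
      bmiAltLoop tsg tc rest eqm' subm'

def buscar_match_inteligente_alt (texto_ocr : String) (codigos_reales : List String) : Option String :=
  let texto_sin_guion := PySem.Str.replace (PySem.Str.upper (PySem.Str.replace (PySem.Str.replace texto_ocr " " "") "_" "")) "-" ""
  let texto_corregido := PySem.Str.replace (PySem.Str.replace (PySem.Str.replace texto_sin_guion "O" "0") "I" "1") "S" "5"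
  match bmiAltLoop texto_sin_guion texto_corregido codigos_reales none none with
  | (some c, _, _) => some c
  | (none, some c, _) => some c
  | (none, none, subm) =>
    if PySem.Str.len texto_corregido ≥ 4 then subm else none

-- ===== PRECONDITION & SPEC =====
def Spec_buscar_match_inteligente (texto_ocr : String) (codigos_reales : List String) (out : Option String) : Prop := out = buscar_match_inteligente_alt texto_ocr codigos_reales
instance (texto_ocr : String) (codigos_reales : List String) (out : Option String) : Decidable (Spec_buscar_match_inteligente texto_ocr codigos_reales out) := by unfold Spec_buscar_match_inteligente; infer_instance

-- ===== CLAIM (what is proved, stated in full; the proofs are below) =====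
def Claim_equal_buscar_match_inteligente : Prop := ∀ (texto_ocr : String) (codigos_reales : List String), Dom_buscar_match_inteligente texto_ocr codigos_reales → Spec_buscar_match_inteligente texto_ocr codigos_reales (buscar_match_inteligente texto_ocr codigos_reales)

-- ===== LEMMAS AND PROOFS =====
-- the post-loop finish of B's algorithm
def bmiFinish (tc : String) : Option String × Option String × Option String → Option String
  | (some c, _, _) => some c
  | (none, some c, _) => some c
  | (none, none, subm) => if PySem.Str.len tc ≥ 4 then subm else none

theorem bmiIfSomeOr {α : Type} (p : Prop) [Decidable p] (c : α) (x : Option α) :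
    (if p then some c else none).or x = if p then some c else x := by
  split <;> simp

-- B's loop + finish computes exactly A's three-scan cascade (with the carried slots
-- taking priority over the remaining scans)
theorem bmiAltLoop_finish (tsg tc : String) (codes : List String) :
    ∀ (eqm subm : Option String),
    bmiFinish tc (bmiAltLoop tsg tc codes eqm subm) =
      match bmiLoop1 tsg codes with
      | some c => some c
      | none =>
        match eqm.or (bmiLoop2 tc codes) with
        | some c => some c
        | none => if PySem.Str.len tc ≥ 4 then subm.or (bmiLoop3 tc codes) else none := by
  induction codes with
  | nil =>
    intro eqm subm
    cases eqm <;> cases subm <;> simp [bmiAltLoop, bmiLoop1, bmiLoop2, bmiLoop3, bmiFinish]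
  | cons c rest ih =>
    intro eqm subm
    simp only [bmiAltLoop, bmiLoop1, bmiLoop2, bmiLoop3]
    by_cases h1 : (PySem.Str.upper (PySem.Str.replace c "-" "") == tsg) = true
    · simp [h1, bmiFinish]
    · simp only [h1, if_false, Bool.false_eq_true]
      rw [ih]
      cases eqm <;> cases subm <;>
        by_cases h2 : (PySem.Str.replace (PySem.Str.upper (PySem.Str.replace c "-" "")) "O" "0" == tc) = true <;>
        by_cases h3 : (PySem.Str.isIn tc (PySem.Str.replace (PySem.Str.upper (PySem.Str.replace c "-" "")) "O" "0")) = true <;>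
        simp [h2, Option.some_or, Option.none_or, bmiIfSomeOr]

-- ===== VERDICT (by name: the statement is the Claim_ definition above) =====
theorem buscar_match_inteligente_spec : Claim_equal_buscar_match_inteligente := by
  intro texto_ocr codigos_reales _
  unfold Spec_buscar_match_inteligente buscar_match_inteligente buscar_match_inteligente_alt
  have h := bmiAltLoop_finish
    (PySem.Str.replace (PySem.Str.upper (PySem.Str.replace (PySem.Str.replace texto_ocr " " "") "_" "")) "-" "")
    (PySem.Str.replace (PySem.Str.replace (PySem.Str.replace (PySem.Str.replace (PySem.Str.upper (PySem.Str.replace (PySem.Str.replace texto_ocr " " "") "_" "")) "-" "") "O" "0") "I" "1") "S" "5")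
    codigos_reales none none
  simp only [Option.or, bmiFinish] at h
  rw [← h]
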